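-- pv_equiv track=rewrite | github.com/volcengine/verl | atropos/environments/intern_bootcamp/internbootcamp_lib/internbootcamp/bootcamp/tapa/tapa.py | get_clue_numbers
-- ===== SOURCE A (Python) =====
-- from collections import deque
--
-- def get_clue_numbers(solution, row, col, rows, cols):
--     if solution[row][col]:
--         return []
--
--     directions = [(-1, -1), (-1, 0), (-1, 1),
--                   (0, -1),          (0, 1),
--                   (1, -1),  (1, 0), (1, 1)]
--     adjacent = []
--     for dr, dc in directions:
--         r = row + dr
--         c = col + dc
--         if 0 <= r < rows and 0 <= c < cols:
--             adjacent.append((r, c))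
--
--     black_cells = [(r, c) for (r, c) in adjacent if solution[r][c]]
--     if not black_cells:
--         return [0]
--
--     visited = set()
--     groups = []
--     for (r, c) in black_cells:
--         if (r, c) not in visited:
--             queue = deque([(r, c)])
--             visited.add((r, c))
--             size = 1
--             while queue:
--                 x, y = queue.popleft()
--                 for dx, dy in [(-1,0), (1,0), (0,1), (0,-1)]:
--                     nx, ny = x + dx, y + dy
--                     if (nx, ny) in black_cells and (nx, ny) not in visited:
--                         visited.add((nx, ny))
--                         queue.append((nx, ny))
--                         size += 1
--             groups.append(size)
--
--     groups.sort()
--     return groups if groups else [0]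
-- ===== SOURCE B (Python) =====
-- def get_clue_numbers(solution, row, col, rows, cols):
--     if solution[row][col]:
--         return []
--     # 8 neighbors in circular (clockwise) order around the center
--     ring = [(-1, -1), (-1, 0), (-1, 1), (0, 1),
--             (1, 1), (1, 0), (1, -1), (0, -1)]
--     flags = [1 if (0 <= row + dr < rows and 0 <= col + dc < cols
--                    and solution[row + dr][col + dc]) else 0
--              for dr, dc in ring]
--     if all(flags):
--         return [8]
--     if not any(flags):
--         return [0]
--     # rotate so the ring starts at a 0: circular runs become linear runs
--     z = flags.index(0)
--     rot = flags[z:] + flags[:z]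
--     runs = []
--     cur = 0
--     for f in rot:
--         if f:
--             cur += 1
--         elif cur:
--             runs.append(cur)
--             cur = 0
--     if cur:
--         runs.append(cur)
--     runs.sort()
--     return runs
-- ===== Notes on version B (the rewrite author's own statement) =====
-- stated objective: alternative
-- what changed: Replaces the BFS flood-fill over the 8 neighbour cells (visited set, deque, per-group scan) by a direct ring computation: a length-8 list of in-bounds-and-black flags in circular order, rotated to start at a 0, whose maximal runs of 1s (with all-ones special-cased to [8]) are exactly the adjacent group sizes.
import Mathlib
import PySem

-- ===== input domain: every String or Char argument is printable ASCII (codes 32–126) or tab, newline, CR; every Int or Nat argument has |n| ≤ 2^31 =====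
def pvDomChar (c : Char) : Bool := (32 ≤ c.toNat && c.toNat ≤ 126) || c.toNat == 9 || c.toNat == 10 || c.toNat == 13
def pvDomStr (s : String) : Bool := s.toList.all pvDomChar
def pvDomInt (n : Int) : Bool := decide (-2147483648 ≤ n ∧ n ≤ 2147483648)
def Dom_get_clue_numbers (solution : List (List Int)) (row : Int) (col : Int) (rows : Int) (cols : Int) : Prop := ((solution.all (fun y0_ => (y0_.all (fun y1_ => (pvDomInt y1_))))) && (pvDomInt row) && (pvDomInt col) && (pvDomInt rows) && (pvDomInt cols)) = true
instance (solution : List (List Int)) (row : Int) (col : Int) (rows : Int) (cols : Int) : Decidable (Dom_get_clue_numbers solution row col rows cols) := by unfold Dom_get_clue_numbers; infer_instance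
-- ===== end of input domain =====

-- B replaces A's BFS flood-fill over the 8 neighbours by a single pass over a circular
-- ring of in-bounds-and-black flags whose maximal runs are the group sizes (alternative
-- decomposition, same cost). Equality of the RETURN values is proved on Pre_.

-- ===== PORT A =====
-- solution[r][c] (both ports only evaluate it where Python indexes; exact via pyGet?,
-- the default 0 is only reached outside Pre_, where Python would raise IndexError)
def pvCell (solution : List (List Int)) (r c : Int) : Int :=
  (((PySem.List.pyGet? solution r).bind (fun rw => PySem.List.pyGet? rw c)).getD 0)

-- 0 <= r < rows and 0 <= c < cols
def pvInb (r c rows cols : Int) : Bool := decide (0 ≤ r ∧ r < rows ∧ 0 ≤ c ∧ c < cols)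

def pvDirs8 : List (Int × Int) := [(-1,-1),(-1,0),(-1,1),(0,-1),(0,1),(1,-1),(1,0),(1,1)]
def pvDirs4 : List (Int × Int) := [(-1,0),(1,0),(0,1),(0,-1)]

-- the 'while queue:' BFS loop; state = (queue, visited, size); fuel = |black_cells|+1,
-- which exceeds the number of pops (1 initial element + at most |black_cells| pushes,
-- each push adding a fresh element to visited ⊆ black_cells), so the fuel guard only
-- makes the same computation total
def pvBfs (black : List (Int × Int)) : List (Int × Int) → PySem.Set (Int × Int) → Int → Nat → PySem.Set (Int × Int) × Int
  | _, vis, size, 0 => (vis, size)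
  | [], vis, size, _ + 1 => (vis, size)
  | q :: rest, vis, size, fuel + 1 =>
      let st := pvDirs4.foldl
        (fun (st : List (Int × Int) × PySem.Set (Int × Int) × Int) d =>
          let n := (q.1 + d.1, q.2 + d.2)
          if black.contains n && !(PySem.Set.contains st.2.1 n) then
            (st.1 ++ [n], PySem.Set.add st.2.1 n, st.2.2 + 1)
          else st)
        (rest, vis, size)
      pvBfs black st.1 st.2.1 st.2.2 fuel

-- the part of A after the 'if not black_cells' guard: group loop, groups.sort(),
-- 'return groups if groups else [0]'
def pvACore (black : List (Int × Int)) : List Int :=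
  let res := black.foldl
    (fun (st : PySem.Set (Int × Int) × List Int) p =>
      if PySem.Set.contains st.1 p then st
      else
        let bf := pvBfs black [p] (PySem.Set.add st.1 p) 1 (black.length + 1)
        (bf.1, st.2 ++ [bf.2]))
    (PySem.Set.empty, [])
  let g := PySem.List.sorted res.2 (fun x => x) false
  if g = [] then [0] else g

def get_clue_numbers (solution : List (List Int)) (row : Int) (col : Int) (rows : Int) (cols : Int) : List Int :=
  if pvCell solution row col ≠ 0 then [] else
  let adjacent := pvDirs8.foldl
    (fun acc d => if pvInb (row + d.1) (col + d.2) rows cols then acc ++ [(row + d.1, col + d.2)] else acc) []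
  let black := adjacent.filter (fun p => pvCell solution p.1 p.2 ≠ 0)
  if black = [] then [0] else pvACore black

-- ===== PORT B =====
-- the 8 neighbour offsets in circular (clockwise) order
def pvRing : List (Int × Int) := [(-1,-1),(-1,0),(-1,1),(0,1),(1,1),(1,0),(1,-1),(0,-1)]

-- B after the centre guard: guards, rotation to a 0, run lengths, runs.sort()
def pvTapaOfFlags (flags : List Int) : List Int :=
  if flags.all (fun f => f ≠ 0) then [8]
  else if !(flags.any (fun f => f ≠ 0)) then [0]
  else
    -- z = flags.index(0); total via getD: a 0 is present here (not all flags nonzero)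
    let z := (PySem.List.index? flags 0).getD 0
    -- flags[z:] + flags[:z] with 0 ≤ z ≤ len(flags): exactly drop/take
    let rot := flags.drop z ++ flags.take z
    let st := rot.foldl
      (fun (st : List Int × Int) f =>
        if f ≠ 0 then (st.1, st.2 + 1)
        else if st.2 ≠ 0 then (st.1 ++ [st.2], 0) else st) ([], 0)
    let runs := if st.2 ≠ 0 then st.1 ++ [st.2] else st.1
    PySem.List.sorted runs (fun x => x) false

def get_clue_numbers_alt (solution : List (List Int)) (row : Int) (col : Int) (rows : Int) (cols : Int) : List Int :=
  if pvCell solution row col ≠ 0 then [] else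
  pvTapaOfFlags (pvRing.map
    (fun d => if pvInb (row + d.1) (col + d.2) rows cols && decide (pvCell solution (row + d.1) (col + d.2) ≠ 0) then (1:Int) else 0))

-- ===== PRECONDITION & SPEC =====
-- solution[r][c] does not raise IndexError: row index r in range (Python negative-index
-- wraparound included) and column index c in range of that row
def pvAccOk (solution : List (List Int)) (r c : Int) : Bool :=
  match PySem.List.pyGet? solution r with
  | none => false
  | some rw => decide (PySem.Raise.InRange rw.length c)

-- Pre_ = exactly the inputs on which Python A returns normally: the centre access
-- succeeds and, when the centre cell is 0 (so A goes on), every in-window neighbour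
-- access succeeds too; everywhere else A raises IndexError.
def Pre_get_clue_numbers (solution : List (List Int)) (row : Int) (col : Int) (rows : Int) (cols : Int) : Prop :=
  pvAccOk solution row col = true ∧
    (pvCell solution row col = 0 →
      ∀ d ∈ pvDirs8, pvInb (row + d.1) (col + d.2) rows cols = true →
        pvAccOk solution (row + d.1) (col + d.2) = true)
instance (solution : List (List Int)) (row : Int) (col : Int) (rows : Int) (cols : Int) : Decidable (Pre_get_clue_numbers solution row col rows cols) := by unfold Pre_get_clue_numbers; infer_instance

def pvWitness_get_clue_numbers : List (List Int) × Int × Int × Int × Int := ([[0,0],[0,1]], 0, 0, 2, 2)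

def Spec_get_clue_numbers (solution : List (List Int)) (row : Int) (col : Int) (rows : Int) (cols : Int) (out : List Int) : Prop := out = get_clue_numbers_alt solution row col rows cols
instance (solution : List (List Int)) (row : Int) (col : Int) (rows : Int) (cols : Int) (out : List Int) : Decidable (Spec_get_clue_numbers solution row col rows cols out) := by unfold Spec_get_clue_numbers; infer_instance

-- ===== CLAIM (what is proved, stated in full; the proofs are below) =====
def Claim_equal_get_clue_numbers : Prop := ∀ (solution : List (List Int)) (row : Int) (col : Int) (rows : Int) (cols : Int), Dom_get_clue_numbers solution row col rows cols → Pre_get_clue_numbers solution row col rows cols → Spec_get_clue_numbers solution row col rows cols (get_clue_numbers solution row col rows cols)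

-- ===== LEMMAS AND PROOFS =====

-- translation of the whole neighbourhood by (ro, co)
def pvShift (ro co : Int) (p : Int × Int) : Int × Int := (ro + p.1, co + p.2)

-- the in-bounds-and-black flag of an offset d
def pvF (solution : List (List Int)) (row col rows cols : Int) (d : Int × Int) : Bool :=
  pvInb (row + d.1) (col + d.2) rows cols && decide (pvCell solution (row + d.1) (col + d.2) ≠ 0)

-- a function on offsets determined by eight Booleans (one per direction of pvDirs8)
def pvFlagFun (f0 f1 f2 f3 f4 f5 f6 f7 : Bool) (d : Int × Int) : Bool :=
  if d = (-1,-1) then f0 else if d = (-1,0) then f1 else if d = (-1,1) then f2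
  else if d = (0,-1) then f3 else if d = (0,1) then f4
  else if d = (1,-1) then f5 else if d = (1,0) then f6 else if d = (1,1) then f7 else false

theorem pvShift_inj (ro co : Int) (a b : Int × Int) : pvShift ro co a = pvShift ro co b ↔ a = b := by
  unfold pvShift
  constructor
  · intro h
    have h1 := congrArg Prod.fst h
    have h2 := congrArg Prod.snd h
    simp at h1 h2
    exact Prod.ext h1 h2
  · intro h; rw [h]

theorem pvShift_injective (ro co : Int) : Function.Injective (pvShift ro co) :=
  fun a b h => (pvShift_inj ro co a b).mp h

theorem pv_mem_map (ro co : Int) (l : List (Int × Int)) (x : Int × Int) :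
    pvShift ro co x ∈ l.map (pvShift ro co) ↔ x ∈ l :=
  List.mem_map_of_injective (pvShift_injective ro co)

theorem pv_contains_map (ro co : Int) (l : List (Int × Int)) (x : Int × Int) :
    (l.map (pvShift ro co)).contains (pvShift ro co x) = l.contains x := by
  simp only [List.contains_eq_mem, decide_eq_decide]
  exact pv_mem_map ro co l x

theorem pv_set_contains_map (ro co : Int) (s : PySem.Set (Int × Int)) (x : Int × Int) :
    PySem.Set.contains (s.map (pvShift ro co)) (pvShift ro co x) = PySem.Set.contains s x := by
  by_cases h : x ∈ s
  · simp [PySem.Set.contains, List.contains_eq_mem, pv_mem_map, h]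
  · simp [PySem.Set.contains, List.contains_eq_mem, pv_mem_map, h]

theorem pv_set_add_map (ro co : Int) (s : PySem.Set (Int × Int)) (x : Int × Int) :
    PySem.Set.add (s.map (pvShift ro co)) (pvShift ro co x) = (PySem.Set.add s x).map (pvShift ro co) := by
  by_cases h : x ∈ s
  · simp [PySem.Set.add, PySem.Set.contains, List.contains_eq_mem, pv_mem_map, h]
  · simp [PySem.Set.add, PySem.Set.contains, List.contains_eq_mem, pv_mem_map, h]

theorem pvShift_step (ro co : Int) (q d : Int × Int) :
    ((pvShift ro co q).1 + d.1, (pvShift ro co q).2 + d.2) = pvShift ro co (q.1 + d.1, q.2 + d.2) := by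
  unfold pvShift; simp; constructor <;> ring

theorem pvBfs_inner_map (ro co : Int) (black : List (Int × Int)) (q : Int × Int)
    (dirs : List (Int × Int)) (st : List (Int × Int) × PySem.Set (Int × Int) × Int) :
    dirs.foldl
      (fun (st : List (Int × Int) × PySem.Set (Int × Int) × Int) d =>
        let n := ((pvShift ro co q).1 + d.1, (pvShift ro co q).2 + d.2)
        if (black.map (pvShift ro co)).contains n && !(PySem.Set.contains st.2.1 n) then
          (st.1 ++ [n], PySem.Set.add st.2.1 n, st.2.2 + 1)
        else st)
      (st.1.map (pvShift ro co), st.2.1.map (pvShift ro co), st.2.2)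
    = (((dirs.foldl
      (fun (st : List (Int × Int) × PySem.Set (Int × Int) × Int) d =>
        let n := (q.1 + d.1, q.2 + d.2)
        if black.contains n && !(PySem.Set.contains st.2.1 n) then
          (st.1 ++ [n], PySem.Set.add st.2.1 n, st.2.2 + 1)
        else st) st).1.map (pvShift ro co)),
      ((dirs.foldl
      (fun (st : List (Int × Int) × PySem.Set (Int × Int) × Int) d =>
        let n := (q.1 + d.1, q.2 + d.2)
        if black.contains n && !(PySem.Set.contains st.2.1 n) then
          (st.1 ++ [n], PySem.Set.add st.2.1 n, st.2.2 + 1)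
        else st) st).2.1.map (pvShift ro co)),
      (dirs.foldl
      (fun (st : List (Int × Int) × PySem.Set (Int × Int) × Int) d =>
        let n := (q.1 + d.1, q.2 + d.2)
        if black.contains n && !(PySem.Set.contains st.2.1 n) then
          (st.1 ++ [n], PySem.Set.add st.2.1 n, st.2.2 + 1)
        else st) st).2.2) := by
  induction dirs generalizing st with
  | nil => rfl
  | cons d t ih =>
      simp only [List.foldl_cons]
      rw [pvShift_step, pv_contains_map, pv_set_contains_map]
      by_cases hc : (black.contains (q.1 + d.1, q.2 + d.2) && !(PySem.Set.contains st.2.1 (q.1 + d.1, q.2 + d.2))) = true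
      · rw [hc]
        simp only [if_true]
        have e1 : List.map (pvShift ro co) st.1 ++ [pvShift ro co (q.1 + d.1, q.2 + d.2)]
            = List.map (pvShift ro co) (st.1 ++ [(q.1 + d.1, q.2 + d.2)]) := by simp
        rw [e1, pv_set_add_map]
        exact ih (st.1 ++ [(q.1 + d.1, q.2 + d.2)], PySem.Set.add st.2.1 (q.1 + d.1, q.2 + d.2), st.2.2 + 1)
      · rw [Bool.not_eq_true] at hc
        rw [hc]
        simp only [Bool.false_eq_true, if_false]
        exact ih st

theorem pvBfs_map (ro co : Int) (black : List (Int × Int)) (fuel : Nat) :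
    ∀ (q : List (Int × Int)) (vis : PySem.Set (Int × Int)) (size : Int),
    pvBfs (black.map (pvShift ro co)) (q.map (pvShift ro co)) (vis.map (pvShift ro co)) size fuel
    = ((pvBfs black q vis size fuel).1.map (pvShift ro co), (pvBfs black q vis size fuel).2) := by
  induction fuel with
  | zero => intro q vis size; cases q <;> rfl
  | succ fuel ih =>
      intro q vis size
      cases q with
      | nil => rfl
      | cons q rest =>
          show pvBfs (black.map (pvShift ro co)) ((pvShift ro co q) :: rest.map (pvShift ro co)) (vis.map (pvShift ro co)) size (fuel + 1) = _
          rw [pvBfs, pvBfs]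
          have h := pvBfs_inner_map ro co black q pvDirs4 (rest, vis, size)
          simp only at h ⊢
          rw [h]
          exact ih _ _ _

theorem pvACore_fold_map (ro co : Int) (black : List (Int × Int)) :
    ∀ (l : List (Int × Int)) (vis : PySem.Set (Int × Int)) (gs : List Int),
    (l.map (pvShift ro co)).foldl
      (fun (st : PySem.Set (Int × Int) × List Int) p =>
        if PySem.Set.contains st.1 p then st
        else
          let bf := pvBfs (black.map (pvShift ro co)) [p] (PySem.Set.add st.1 p) 1 (black.length + 1)
          (bf.1, st.2 ++ [bf.2])) (vis.map (pvShift ro co), gs)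
    = (((l.foldl
      (fun (st : PySem.Set (Int × Int) × List Int) p =>
        if PySem.Set.contains st.1 p then st
        else
          let bf := pvBfs black [p] (PySem.Set.add st.1 p) 1 (black.length + 1)
          (bf.1, st.2 ++ [bf.2])) (vis, gs)).1).map (pvShift ro co),
      (l.foldl
      (fun (st : PySem.Set (Int × Int) × List Int) p =>
        if PySem.Set.contains st.1 p then st
        else
          let bf := pvBfs black [p] (PySem.Set.add st.1 p) 1 (black.length + 1)
          (bf.1, st.2 ++ [bf.2])) (vis, gs)).2) := by
  intro l
  induction l with
  | nil => intro vis gs; rfl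
  | cons p t ih =>
      intro vis gs
      simp only [List.map_cons, List.foldl_cons]
      rw [pv_set_contains_map]
      by_cases hc : PySem.Set.contains vis p = true
      · rw [hc]; simp only [if_true]; exact ih vis gs
      · rw [Bool.not_eq_true] at hc
        rw [hc]
        simp only [Bool.false_eq_true, if_false]
        have h1 : ([pvShift ro co p] : List (Int × Int)) = [p].map (pvShift ro co) := rfl
        rw [h1, pv_set_add_map ro co vis p,
          pvBfs_map ro co black (black.length + 1) [p] (PySem.Set.add vis p) 1]
        exact ih (pvBfs black [p] (PySem.Set.add vis p) 1 (black.length + 1)).1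
          (gs ++ [(pvBfs black [p] (PySem.Set.add vis p) 1 (black.length + 1)).2])

theorem pvACore_map (ro co : Int) (black : List (Int × Int)) :
    pvACore (black.map (pvShift ro co)) = pvACore black := by
  unfold pvACore
  simp only [List.length_map]
  conv_lhs => rw [show ((PySem.Set.empty : PySem.Set (Int × Int)), ([] : List Int))
      = ((PySem.Set.empty : PySem.Set (Int × Int)).map (pvShift ro co), ([] : List Int)) from rfl]
  rw [pvACore_fold_map ro co black black PySem.Set.empty []]

-- the ring flags written from the eight direction flags (pvRing order)
def pvFlagList (f0 f1 f2 f3 f4 f5 f6 f7 : Bool) : List Int :=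
  [if f0 then 1 else 0, if f1 then 1 else 0, if f2 then 1 else 0, if f4 then 1 else 0,
   if f7 then 1 else 0, if f6 then 1 else 0, if f5 then 1 else 0, if f3 then 1 else 0]

-- the heart of the equivalence: for every pattern of the eight flags, A's group-BFS
-- pipeline and B's circular-run pipeline give the same list
theorem pv_core_flags : ∀ f0 f1 f2 f3 f4 f5 f6 f7 : Bool,
    (if pvDirs8.filter (pvFlagFun f0 f1 f2 f3 f4 f5 f6 f7) = [] then ([0] : List Int)
     else pvACore (pvDirs8.filter (pvFlagFun f0 f1 f2 f3 f4 f5 f6 f7)))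
    = pvTapaOfFlags (pvFlagList f0 f1 f2 f3 f4 f5 f6 f7) := by
  decide

theorem pv_filter_flagfun (solution : List (List Int)) (row col rows cols : Int) :
    pvDirs8.filter (pvF solution row col rows cols)
    = pvDirs8.filter (pvFlagFun (pvF solution row col rows cols (-1,-1)) (pvF solution row col rows cols (-1,0))
        (pvF solution row col rows cols (-1,1)) (pvF solution row col rows cols (0,-1))
        (pvF solution row col rows cols (0,1)) (pvF solution row col rows cols (1,-1))
        (pvF solution row col rows cols (1,0)) (pvF solution row col rows cols (1,1))) := by
  apply List.filter_congr
  intro d hd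
  fin_cases hd <;> rfl

theorem pv_black_eq (solution : List (List Int)) (row col rows cols : Int) :
    (pvDirs8.foldl
      (fun acc d => if pvInb (row + d.1) (col + d.2) rows cols then acc ++ [(row + d.1, col + d.2)] else acc) []).filter
      (fun p => pvCell solution p.1 p.2 ≠ 0)
    = (pvDirs8.filter (pvF solution row col rows cols)).map (pvShift row col) := by
  rw [PySem.List.foldl_append_if (fun d => pvInb (row + d.1) (col + d.2) rows cols)
      (fun d => (row + d.1, col + d.2)) pvDirs8 []]
  simp only [List.nil_append]
  have hm : (fun d : Int × Int => (row + d.1, col + d.2)) = pvShift row col := rfl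
  rw [hm, List.filter_map, List.filter_filter]
  congr 1
  apply List.filter_congr
  intro d _
  simp only [pvF, pvShift, Function.comp]
  exact Bool.and_comm _ _

theorem pv_flags_eq (solution : List (List Int)) (row col rows cols : Int) :
    pvRing.map
      (fun d => if pvInb (row + d.1) (col + d.2) rows cols && decide (pvCell solution (row + d.1) (col + d.2) ≠ 0) then (1:Int) else 0)
    = pvFlagList (pvF solution row col rows cols (-1,-1)) (pvF solution row col rows cols (-1,0))
        (pvF solution row col rows cols (-1,1)) (pvF solution row col rows cols (0,-1))
        (pvF solution row col rows cols (0,1)) (pvF solution row col rows cols (1,-1))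
        (pvF solution row col rows cols (1,0)) (pvF solution row col rows cols (1,1)) := by
  rfl

-- ===== VERDICT (by name: the statement is the Claim_ definition above) =====
theorem get_clue_numbers_spec : Claim_equal_get_clue_numbers := by
  intro solution row col rows cols _hdom _hpre
  unfold Spec_get_clue_numbers get_clue_numbers get_clue_numbers_alt
  by_cases hc : pvCell solution row col ≠ 0
  · rw [if_pos hc, if_pos hc]
  · rw [if_neg hc, if_neg hc]
    simp only []
    rw [pv_flags_eq, pv_black_eq, pv_filter_flagfun]
    rw [← pv_core_flags]
    simp only [List.map_eq_nil_iff]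
    by_cases hnil : pvDirs8.filter (pvFlagFun (pvF solution row col rows cols (-1,-1)) (pvF solution row col rows cols (-1,0))
        (pvF solution row col rows cols (-1,1)) (pvF solution row col rows cols (0,-1))
        (pvF solution row col rows cols (0,1)) (pvF solution row col rows cols (1,-1))
        (pvF solution row col rows cols (1,0)) (pvF solution row col rows cols (1,1))) = []
    · rw [if_pos hnil, if_pos hnil]
    · rw [if_neg hnil, if_neg hnil, pvACore_map]
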